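-- pv_equiv track=rewrite | github.com/mgm52/neural-chameleons | experiments/self_obfuscation_v1/utils_data.py | cut_to_first_sentence
-- ===== SOURCE A (Python) =====
-- def cut_to_first_sentence(text: str, minimum_cut_length: int = -1) -> str:
--     """Cut a text to the first sentence that ends after a minimum length."""
--     end_chars = '.!?\n'
--     start_search = minimum_cut_length if minimum_cut_length > 0 else 0
--     first_end_index = -1
--
--     for char in end_chars:
--         index = text.find(char, start_search)
--         if index != -1 and (first_end_index == -1 or index < first_end_index):
--             first_end_index = index
--
--     if first_end_index != -1:
--         return text[:first_end_index+1].strip()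
--
--     if minimum_cut_length > 0:
--         first_end_index_any = -1
--         for char in end_chars:
--             index = text.find(char)
--             if index != -1 and (first_end_index_any == -1 or index < first_end_index_any):
--                 first_end_index_any = index
--         if first_end_index_any != -1:
--             return text[:first_end_index_any+1].strip()
--
--     return text.strip()
-- ===== SOURCE B (Python) =====
-- def cut_to_first_sentence(text: str, minimum_cut_length: int = -1) -> str:
--     """Cut a text to the first sentence that ends after a minimum length."""
--     def first_end(s, start):
--         i = start
--         for ch in s[start:]:
--             if ch in '.!?\n':
--                 return i
--             i += 1
--         return -1
--
--     start = minimum_cut_length if minimum_cut_length > 0 else 0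
--     idx = first_end(text, start)
--     if idx == -1 and minimum_cut_length > 0:
--         idx = first_end(text, 0)
--     if idx != -1:
--         return text[:idx + 1].strip()
--     return text.strip()
-- ===== Notes on version B (the rewrite author's own statement) =====
-- stated objective: simpler
-- what changed: B replaces A's four repeated str.find scans with min bookkeeping (done twice for the fallback) by a single recursive/iterative scan that walks the text once from the start index and returns the first position holding any sentence-ending character.
import Mathlib
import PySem

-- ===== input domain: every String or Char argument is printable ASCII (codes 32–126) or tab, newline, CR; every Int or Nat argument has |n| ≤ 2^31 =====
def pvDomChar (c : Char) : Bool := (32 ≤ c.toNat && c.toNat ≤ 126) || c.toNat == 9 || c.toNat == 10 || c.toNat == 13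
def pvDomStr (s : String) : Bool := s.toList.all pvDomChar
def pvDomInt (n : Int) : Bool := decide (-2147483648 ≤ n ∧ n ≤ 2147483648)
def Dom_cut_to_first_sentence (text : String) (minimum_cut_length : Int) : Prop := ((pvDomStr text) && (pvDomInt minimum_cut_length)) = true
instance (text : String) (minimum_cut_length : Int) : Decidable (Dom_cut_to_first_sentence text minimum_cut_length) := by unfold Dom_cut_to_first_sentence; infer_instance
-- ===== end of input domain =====

-- B replaces A's four repeated find scans (with min bookkeeping, done twice for the fallback)
-- by a single scan from the start index; objective: simpler.

-- ===== PORT A =====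
-- literal port: for each end char, text.find(char, start_search); keep the smallest non-(-1) index
def cut_to_first_sentence (text : String) (minimum_cut_length : Int) : String :=
  let end_chars : List Char := ['.', '!', '?', '\n']
  let start_search : Int := if minimum_cut_length > 0 then minimum_cut_length else 0
  let first_end_index : Int :=
    end_chars.foldl (fun acc c =>
      let index := PySem.Str.findFrom text (String.ofList [c]) start_search
      if index ≠ -1 ∧ (acc = -1 ∨ index < acc) then index else acc) (-1)
  if first_end_index ≠ -1 then
    PySem.Str.strip (PySem.Str.slice text none (some (first_end_index + 1)))
  else if minimum_cut_length > 0 then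
    let first_end_index_any : Int :=
      end_chars.foldl (fun acc c =>
        let index := PySem.Str.find text (String.ofList [c])
        if index ≠ -1 ∧ (acc = -1 ∨ index < acc) then index else acc) (-1)
    if first_end_index_any ≠ -1 then
      PySem.Str.strip (PySem.Str.slice text none (some (first_end_index_any + 1)))
    else PySem.Str.strip text
  else PySem.Str.strip text

-- ===== PORT B =====
-- B's helper: walk the characters once from position i, return the first index holding an end char
def firstEnd : List Char → Nat → Int
  | [], _ => -1
  | ch :: rest, i => if ch ∈ ['.', '!', '?', '\n'] then (i : Int) else firstEnd rest (i + 1)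

def cut_to_first_sentence_alt (text : String) (minimum_cut_length : Int) : String :=
  let start : Int := if minimum_cut_length > 0 then minimum_cut_length else 0
  let idx0 : Int := firstEnd (PySem.List.slice text.toList (some start) none) start.toNat
  let idx : Int := if idx0 = -1 ∧ minimum_cut_length > 0 then firstEnd text.toList 0 else idx0
  if idx ≠ -1 then PySem.Str.strip (PySem.Str.slice text none (some (idx + 1)))
  else PySem.Str.strip text

-- ===== PRECONDITION & SPEC =====
def Spec_cut_to_first_sentence (text : String) (minimum_cut_length : Int) (out : String) : Prop := out = cut_to_first_sentence_alt text minimum_cut_length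
instance (text : String) (minimum_cut_length : Int) (out : String) : Decidable (Spec_cut_to_first_sentence text minimum_cut_length out) := by unfold Spec_cut_to_first_sentence; infer_instance

-- ===== CLAIM (what is proved, stated in full; the proofs are below) =====
def Claim_equal_cut_to_first_sentence : Prop := ∀ (text : String) (minimum_cut_length : Int), Dom_cut_to_first_sentence text minimum_cut_length → Spec_cut_to_first_sentence text minimum_cut_length (cut_to_first_sentence text minimum_cut_length)

-- ===== LEMMAS AND PROOFS =====

-- the end-char predicate, and an Option Nat → Int reading: none = -1, some j = k + j
def pvP (x : Char) : Bool := x == '.' || x == '!' || x == '?' || x == '\n'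

def optInt (k : Int) : Option Nat → Int
  | none => -1
  | some j => k + (j : Int)

def mo : Option Nat → Option Nat → Option Nat
  | none, b => b
  | some i, none => some i
  | some i, some j => some (min i j)

theorem firstEnd_eq (l : List Char) (k : Nat) :
    firstEnd l k = optInt (k : Int) (l.findIdx? pvP) := by
  induction l generalizing k with
  | nil => simp [firstEnd, optInt]
  | cons x rest ih =>
    by_cases hx : pvP x = true
    · have hmem : x ∈ ['.', '!', '?', '\n'] := by
        simp [pvP] at hx; simp; tauto
      simp [firstEnd, hmem, List.findIdx?_cons, hx, optInt]
    · have hmem : x ∉ ['.', '!', '?', '\n'] := by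
        simp [pvP] at hx; simp [hx]
      simp only [firstEnd, List.findIdx?_cons, hx, if_neg hmem, if_false, ih]
      cases List.findIdx? pvP rest <;> simp [optInt] <;> omega

theorem singleton_prefix_iff (c : Char) (l : List Char) : [c] <+: l ↔ l[0]? = some c := by
  cases l <;> simp [List.cons_prefix_iff, eq_comm]

theorem find_single (d : List Char) (c : Char) :
    PySem.Chars.find d [c] = optInt 0 (d.findIdx? (· == c)) := by
  cases h : d.findIdx? (· == c) with
  | none =>
    have : ∀ x ∈ d, ¬ x = c := by
      intro x hx; have := (List.findIdx?_eq_none_iff.mp h) x hx; simpa using this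
    have hnm : c ∉ d := fun hc => this c hc rfl
    have : PySem.Chars.find d [c] = -1 :=
      (PySem.Chars.find_eq_neg_one_iff d [c]).mpr (by
        intro hin; exact hnm ((List.singleton_infix_iff c d).mp hin))
    simp [this, optInt]
  | some j =>
    obtain ⟨hlt, hj, hmin⟩ := List.findIdx?_eq_some_iff_getElem.mp h
    have hin : [c] <:+: d := (List.singleton_infix_iff c d).mpr (by
      have : d[j] = c := by simpa using hj
      exact this ▸ List.getElem_mem hlt)
    have hge : 0 ≤ PySem.Chars.find d [c] := (PySem.Chars.find_nonneg_iff d [c]).mpr hin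
    obtain ⟨hpre, hlo⟩ := PySem.Chars.find_spec hge
    set n := (PySem.Chars.find d [c]).toNat with hn
    have hdn : d[n]? = some c := by
      have := (singleton_prefix_iff c (d.drop n)).mp hpre
      simpa [List.getElem?_drop] using this
    -- n = j by mutual minimality
    have hnj : n = j := by
      rcases Nat.lt_trichotomy n j with h1 | h1 | h1
      · exact absurd (by simpa using hdn) (by
          have hnlen : n < d.length := Nat.lt_trans h1 hlt
          intro hc
          exact hmin n h1 (by simp [List.getElem?_eq_getElem hnlen] at hdn; simp [hdn]))
      · exact h1
      · exfalso
        apply hlo j h1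
        rw [singleton_prefix_iff, List.getElem?_drop]
        simp [List.getElem?_eq_getElem hlt]
        simpa using hj
    simp only [optInt]
    omega

theorem mo_some_zero (x : Option Nat) : mo (some 0) x = some 0 := by
  cases x <;> simp [mo]

theorem mo_map_zero (a : Option Nat) : mo (Option.map (fun i => i + 1) a) (some 0) = some 0 := by
  cases a <;> simp [mo]

theorem mo_map (a b : Option Nat) :
    mo (Option.map (fun i => i + 1) a) (Option.map (fun i => i + 1) b)
      = Option.map (fun i => i + 1) (mo a b) := by
  cases a <;> cases b <;> simp [mo] <;> omega

theorem findIdx?_mo (d : List Char) :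
    d.findIdx? pvP =
      mo (d.findIdx? (· == '.')) (mo (d.findIdx? (· == '!'))
        (mo (d.findIdx? (· == '?')) (d.findIdx? (· == '\n')))) := by
  induction d with
  | nil => simp [mo]
  | cons x rest ih =>
    by_cases h1 : x = '.'
    · simp [List.findIdx?_cons, pvP, h1, mo_some_zero, mo_map_zero]
    · by_cases h2 : x = '!'
      · simp [List.findIdx?_cons, pvP, h1, h2, mo_some_zero, mo_map_zero]
      · by_cases h3 : x = '?'
        · simp [List.findIdx?_cons, pvP, h1, h2, h3, mo_some_zero, mo_map_zero]
        · by_cases h4 : x = '\n'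
          · simp [List.findIdx?_cons, pvP, h1, h2, h3, h4, mo_some_zero, mo_map_zero]
          · simp [List.findIdx?_cons, pvP, h1, h2, h3, h4, ih, mo_map]

-- one fold step of A's loop
def pvStep (acc v : Int) : Int := if v ≠ -1 ∧ (acc = -1 ∨ v < acc) then v else acc

theorem fold_mo (k : Int) (hk : 0 ≤ k) (a b c d : Option Nat) :
    pvStep (pvStep (pvStep (pvStep (-1) (optInt k a)) (optInt k b)) (optInt k c)) (optInt k d)
      = optInt k (mo a (mo b (mo c d))) := by
  rcases a with _ | i <;> rcases b with _ | j <;> rcases c with _ | l <;> rcases d with _ | m <;>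
    simp [pvStep, optInt, mo] <;> (try split_ifs) <;> intros <;> omega

theorem findFrom_past (s sub : List Char) (st : Int) (h : (s.length : Int) < st) :
    PySem.Chars.findFrom s sub st none = -1 := by
  simp only [PySem.Chars.findFrom]
  have h0 : ¬ st < 0 := by omega
  simp only [if_neg h0]
  rw [if_pos h]

theorem phase (s : List Char) (st : Int) (hst : 0 ≤ st) :
    pvStep (pvStep (pvStep (pvStep (-1)
        (PySem.Chars.findFrom s ['.'] st)) (PySem.Chars.findFrom s ['!'] st))
        (PySem.Chars.findFrom s ['?'] st)) (PySem.Chars.findFrom s ['\n'] st)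
      = firstEnd (List.drop st.toNat s) st.toNat := by
  by_cases hlen : st.toNat ≤ s.length
  · have hcast : st = ((st.toNat : Nat) : Int) := by omega
    have hff : ∀ c : Char, PySem.Chars.findFrom s [c] st =
        optInt (st.toNat : Int) ((List.drop st.toNat s).findIdx? (· == c)) := by
      intro c
      rw [hcast, PySem.Chars.findFrom_natCast s [c] st.toNat hlen, find_single]
      simp only [Int.toNat_natCast]
      cases hfi : (List.drop st.toNat s).findIdx? (· == c) <;>
        simp only [hfi, optInt] <;> (try split_ifs) <;> omega
    rw [hff, hff, hff, hff, fold_mo _ (by positivity), firstEnd_eq, findIdx?_mo]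
  · have hpast : (s.length : Int) < st := by omega
    have hdrop : List.drop st.toNat s = [] := List.drop_eq_nil_of_le (by omega)
    simp [findFrom_past s _ st hpast, pvStep, hdrop, firstEnd]

-- A's foldl over the four end chars is exactly the nested pvStep expression
theorem foldA_eq (text : String) (st : Int) :
    (['.', '!', '?', '\n'].foldl (fun acc c =>
      let index := PySem.Str.findFrom text (String.ofList [c]) st
      if index ≠ -1 ∧ (acc = -1 ∨ index < acc) then index else acc) (-1))
    = pvStep (pvStep (pvStep (pvStep (-1)
        (PySem.Chars.findFrom text.toList ['.'] st)) (PySem.Chars.findFrom text.toList ['!'] st))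
        (PySem.Chars.findFrom text.toList ['?'] st)) (PySem.Chars.findFrom text.toList ['\n'] st) := by
  simp [List.foldl, pvStep, PySem.Str.findFrom_eq]

theorem foldA_find_eq (text : String) :
    (['.', '!', '?', '\n'].foldl (fun acc c =>
      let index := PySem.Str.find text (String.ofList [c])
      if index ≠ -1 ∧ (acc = -1 ∨ index < acc) then index else acc) (-1))
    = firstEnd text.toList 0 := by
  have h : ∀ c : Char, PySem.Str.find text (String.ofList [c]) =
      PySem.Chars.findFrom text.toList [c] 0 := by
    intro c; rw [PySem.Str.find_eq, PySem.Chars.findFrom_zero]; simp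
  simp only [List.foldl, h]
  have := phase text.toList 0 le_rfl
  simp only [Int.toNat_zero, List.drop_zero] at this
  rw [← this]
  simp [pvStep]

-- ===== VERDICT (by name: the statement is the Claim_ definition above) =====
theorem cut_to_first_sentence_spec : Claim_equal_cut_to_first_sentence := by
  intro text m _
  unfold Spec_cut_to_first_sentence cut_to_first_sentence cut_to_first_sentence_alt
  dsimp only
  set st : Int := if m > 0 then m else 0 with hstdef
  have hst : 0 ≤ st := by simp [hstdef]; split <;> omega
  have h1 : (['.', '!', '?', '\n'].foldl (fun acc c =>
      let index := PySem.Str.findFrom text (String.ofList [c]) st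
      if index ≠ -1 ∧ (acc = -1 ∨ index < acc) then index else acc) (-1))
      = firstEnd (PySem.List.slice text.toList (some st) none) st.toNat := by
    rw [foldA_eq, phase text.toList st hst, PySem.List.slice_from text.toList hst]
  rw [h1, foldA_find_eq]
  set fe := firstEnd (PySem.List.slice text.toList (some st) none) st.toNat with hfe
  by_cases hfe1 : fe = -1
  · by_cases hm : m > 0
    · simp [hfe1, hm]
    · simp [hfe1, hm]
  · simp [hfe1]
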